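-- pv_equiv track=rewrite | github.com/zay168/prime-gap-symmetry-1b | 07_verification_numerique.py | find_consecutive_equal_gaps
-- ===== SOURCE A (Python) =====
-- from typing import List, Tuple
--
-- def find_consecutive_equal_gaps(gaps: List[int], min_length: int = 2) -> List[Tuple[int, int, int]]:
--     """
--     Trouve toutes les séquences de gaps consécutifs égaux.
--
--     Retourne une liste de tuples (start_index, length, gap_value).
--     """
--     if len(gaps) < 2:
--         return []
--
--     sequences = []
--     i = 0
--
--     while i < len(gaps):
--         current_gap = gaps[i]
--         length = 1
--
--         # Compter combien de gaps consécutifs sont égaux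
--         while i + length < len(gaps) and gaps[i + length] == current_gap:
--             length += 1
--
--         if length >= min_length:
--             sequences.append((i, length, current_gap))
--
--         i += length
--
--     return sequences
-- ===== SOURCE B (Python) =====
-- from typing import List, Tuple
--
-- def find_consecutive_equal_gaps(gaps: List[int], min_length: int = 2) -> List[Tuple[int, int, int]]:
--     if len(gaps) < 2:
--         return []
--     n = len(gaps)
--     # staged passes: first compute the run boundaries (indices where the value changes),
--     # then pair up adjacent boundaries into (start, length, value) triples.
--     bounds = [0] + [i for i in range(1, n) if gaps[i] != gaps[i - 1]] + [n]
--     return [(s, e - s, gaps[s]) for s, e in zip(bounds, bounds[1:]) if e - s >= min_length]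
-- ===== Notes on version B (the rewrite author's own statement) =====
-- stated objective: alternative
-- what changed: Instead of A's nested while loops that count each run in place, B works in staged passes: it first computes the list of run-boundary indices by comparing adjacent elements, then zips consecutive boundaries into (start, length, value) triples, filtering by min_length.
import Mathlib
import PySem

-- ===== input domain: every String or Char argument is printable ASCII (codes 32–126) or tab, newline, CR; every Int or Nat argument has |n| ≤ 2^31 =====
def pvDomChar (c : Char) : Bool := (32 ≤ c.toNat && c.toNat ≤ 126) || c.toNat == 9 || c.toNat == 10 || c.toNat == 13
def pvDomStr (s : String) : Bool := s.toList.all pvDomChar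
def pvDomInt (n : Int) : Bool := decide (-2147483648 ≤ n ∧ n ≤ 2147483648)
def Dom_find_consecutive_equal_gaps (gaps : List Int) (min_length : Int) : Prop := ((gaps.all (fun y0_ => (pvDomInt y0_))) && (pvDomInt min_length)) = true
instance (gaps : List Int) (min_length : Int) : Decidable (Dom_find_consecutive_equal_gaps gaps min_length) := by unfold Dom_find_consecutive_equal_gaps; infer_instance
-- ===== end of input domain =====

-- B replaces A's nested while loops by staged passes: a boundary-index list built by comparing
-- adjacent elements, then adjacent boundaries zipped into (start, length, value) triples (alternative; same cost).


-- ===== PORT A =====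
-- inner while: `while i + length < len(gaps) and gaps[i + length] == current_gap: length += 1`
def pvCountRun (gaps : List Int) (i : Nat) (current : Int) (length : Nat) : Nat :=
  if h : i + length < gaps.length then
    if gaps[i + length] = current then pvCountRun gaps i current (length + 1) else length
  else length
termination_by gaps.length - (i + length)

-- needed by pvALoop's termination: the inner while never decreases `length`
theorem pvCountRun_ge (gaps : List Int) (i : Nat) (c : Int) (k : Nat) :
    k ≤ pvCountRun gaps i c k := by
  unfold pvCountRun
  split
  · split
    · exact le_trans (Nat.le_succ k) (pvCountRun_ge gaps i c (k + 1))
    · exact le_refl k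
  · exact le_refl k
termination_by gaps.length - (i + k)

-- outer while loop of A, accumulating `sequences` as the returned list
def pvALoop (gaps : List Int) (min_length : Int) (i : Nat) : List (Int × Int × Int) :=
  if h : i < gaps.length then
    let current_gap := gaps[i]
    let length := pvCountRun gaps i current_gap 1
    (if min_length ≤ (length : Int) then [((i : Int), (length : Int), current_gap)] else []) ++
      pvALoop gaps min_length (i + length)
  else []
termination_by gaps.length - i
decreasing_by
  have h1 : 1 ≤ pvCountRun gaps i gaps[i] 1 := pvCountRun_ge gaps i gaps[i] 1
  omega

def find_consecutive_equal_gaps (gaps : List Int) (min_length : Int) : List (Int × Int × Int) :=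
  if gaps.length < 2 then [] else pvALoop gaps min_length 0

-- ===== PORT B =====
-- `[i for i in range(1, n) if gaps[i] != gaps[i - 1]]` (indices are in range, so getD is exact)
def pvCuts (gaps : List Int) : List Nat :=
  (List.range' 1 (gaps.length - 1)).filter (fun i => decide (¬ gaps.getD i 0 = gaps.getD (i - 1) 0))

-- `bounds = [0] + cuts + [n]`
def pvBounds (gaps : List Int) : List Nat := 0 :: pvCuts gaps ++ [gaps.length]

-- the final comprehension `[(s, e - s, gaps[s]) for s, e in zip(bounds, bounds[1:]) if e - s >= min_length]`
def find_consecutive_equal_gaps_alt (gaps : List Int) (min_length : Int) : List (Int × Int × Int) :=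
  if gaps.length < 2 then []
  else
    ((pvBounds gaps).zip (pvBounds gaps).tail).foldr
      (fun p acc =>
        if min_length ≤ (p.2 : Int) - (p.1 : Int) then
          ((p.1 : Int), (p.2 : Int) - (p.1 : Int), gaps.getD p.1 0) :: acc
        else acc) []

-- ===== PRECONDITION & SPEC =====
def Spec_find_consecutive_equal_gaps (gaps : List Int) (min_length : Int) (out : List (Int × Int × Int)) : Prop := out = find_consecutive_equal_gaps_alt gaps min_length
instance (gaps : List Int) (min_length : Int) (out : List (Int × Int × Int)) : Decidable (Spec_find_consecutive_equal_gaps gaps min_length out) := by unfold Spec_find_consecutive_equal_gaps; infer_instance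

-- ===== CLAIM (what is proved, stated in full; the proofs are below) =====
def Claim_equal_find_consecutive_equal_gaps : Prop := ∀ (gaps : List Int) (min_length : Int), Dom_find_consecutive_equal_gaps gaps min_length → Spec_find_consecutive_equal_gaps gaps min_length (find_consecutive_equal_gaps gaps min_length)

-- ===== LEMMAS AND PROOFS =====

-- every index strictly inside the run counted by the inner while holds the run's value
theorem pvCountRun_run (gaps : List Int) (i : Nat) (c : Int) (k : Nat) (j : Nat)
    (h1 : k ≤ j) (h2 : j < pvCountRun gaps i c k) :
    i + j < gaps.length ∧ gaps.getD (i + j) 0 = c := by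
  rw [pvCountRun] at h2
  split at h2
  · rename_i hlt
    split at h2
    · rename_i heq
      by_cases hjk : j = k
      · subst hjk
        exact ⟨hlt, by rw [List.getD_eq_getElem _ _ hlt]; exact heq⟩
      · exact pvCountRun_run gaps i c (k + 1) j (by omega) h2
    · omega
  · omega
termination_by gaps.length - (i + k)

-- the inner while stops either at the end of the list or at a value different from the run's
theorem pvCountRun_stop (gaps : List Int) (i : Nat) (c : Int) (k : Nat) (L : Nat)
    (hL : pvCountRun gaps i c k = L) (h : i + L < gaps.length) :
    ¬ gaps.getD (i + L) 0 = c := by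
  rw [pvCountRun] at hL
  split at hL
  · split at hL
    · exact pvCountRun_stop gaps i c (k + 1) L hL h
    · rename_i hlt hne
      subst hL
      rw [List.getD_eq_getElem _ _ h]
      exact hne
  · rename_i hge
    subst hL
    exact absurd h hge
termination_by gaps.length - (i + k)

-- the inner while never runs past the end of the list
theorem pvCountRun_le (gaps : List Int) (i : Nat) (c : Int) (k : Nat)
    (h : i + k ≤ gaps.length) : i + pvCountRun gaps i c k ≤ gaps.length := by
  rw [pvCountRun]
  split
  · split
    · exact pvCountRun_le gaps i c (k + 1) (by omega)
    · exact h
  · exact h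
termination_by gaps.length - (i + k)

-- one unfolding step of A's outer loop at an in-range index
theorem pvALoop_unfold (gaps : List Int) (ml : Int) (i : Nat) (h : i < gaps.length) :
    pvALoop gaps ml i =
      (if ml ≤ ((pvCountRun gaps i gaps[i] 1 : Nat) : Int) then
        [((i : Int), ((pvCountRun gaps i gaps[i] 1 : Nat) : Int), gaps[i])] else []) ++
      pvALoop gaps ml (i + pvCountRun gaps i gaps[i] 1) := by
  rw [pvALoop, dif_pos h]

-- proof-side reading of B's zip/fold: process the pair list (s,b1),(b1,b2),… left to right
def pvProc (gaps : List Int) (ml : Int) : Nat → List Nat → List (Int × Int × Int)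
  | _, [] => []
  | s, e :: bs =>
    (if ml ≤ (e : Int) - (s : Int) then [((s : Int), (e : Int) - (s : Int), gaps.getD s 0)] else []) ++
      pvProc gaps ml e bs

-- B's zip-then-fold over a boundary list equals pvProc
theorem pvZip_eq_proc (gaps : List Int) (ml : Int) (b : Nat) (bs : List Nat) :
    ((b :: bs).zip bs).foldr
      (fun p acc =>
        if ml ≤ (p.2 : Int) - (p.1 : Int) then
          ((p.1 : Int), (p.2 : Int) - (p.1 : Int), gaps.getD p.1 0) :: acc
        else acc) [] = pvProc gaps ml b bs := by
  induction bs generalizing b with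
  | nil => rfl
  | cons e bs ih =>
    rw [List.zip_cons_cons, List.foldr_cons, ih e, pvProc]
    split_ifs <;> simp

-- main invariant: pvProc from start i over the remaining boundaries equals A's outer loop from i
theorem pvProc_eq_ALoop (gaps : List Int) (ml : Int) (i : Nat) (h : i < gaps.length) :
    pvProc gaps ml i
      (((List.range' (i + 1) (gaps.length - i - 1)).filter
          (fun j => decide (¬ gaps.getD j 0 = gaps.getD (j - 1) 0))) ++ [gaps.length]) =
    pvALoop gaps ml i := by
  have hL1 : 1 ≤ pvCountRun gaps i gaps[i] 1 := pvCountRun_ge gaps i gaps[i] 1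
  have hLle : i + pvCountRun gaps i gaps[i] 1 ≤ gaps.length :=
    pvCountRun_le gaps i gaps[i] 1 (by omega)
  set L := pvCountRun gaps i gaps[i] 1 with hLdef
  have hrun : ∀ j, 1 ≤ j → j < L → gaps.getD (i + j) 0 = gaps[i] :=
    fun j hj1 hj2 => (pvCountRun_run gaps i gaps[i] 1 j hj1 hj2).2
  have hrun0 : ∀ j, j < L → gaps.getD (i + j) 0 = gaps[i] := by
    intro j hj
    rcases Nat.eq_zero_or_pos j with h0 | h0
    · subst h0
      rw [List.getD_eq_getElem _ _ (by omega : i + 0 < gaps.length)]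
      simp
    · exact hrun j h0 hj
  -- split the index range at the end of the first run
  have hsplit : List.range' (i + 1) (gaps.length - i - 1) =
      List.range' (i + 1) (L - 1) ++ List.range' (i + L) (gaps.length - i - L) := by
    rw [show i + L = (i + 1) + 1 * (L - 1) by omega, List.range'_append]
    congr 1
    omega
  have hfilt1 : (List.range' (i + 1) (L - 1)).filter
      (fun j => decide (¬ gaps.getD j 0 = gaps.getD (j - 1) 0)) = [] := by
    apply List.filter_eq_nil_iff.mpr
    intro j hj
    rw [List.mem_range'] at hj
    obtain ⟨hj1, hj2⟩ := hj
    have e1 : gaps.getD j 0 = gaps[i] := by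
      have := hrun0 (j - i) (by omega)
      rwa [show i + (j - i) = j by omega] at this
    have e2 : gaps.getD (j - 1) 0 = gaps[i] := by
      have := hrun0 (j - 1 - i) (by omega)
      rwa [show i + (j - 1 - i) = j - 1 by omega] at this
    simp only [decide_eq_true_eq]
    exact not_not_intro (e1.trans e2.symm)
  rw [hsplit, List.filter_append, hfilt1, List.nil_append]
  rw [pvALoop_unfold gaps ml i h]
  have hcast : ((i + L : Nat) : Int) - ((i : Nat) : Int) = (L : Int) := by push_cast; ring
  rcases Nat.lt_or_ge (i + L) gaps.length with hlt | hge
  · -- the next run starts at i + L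
    have hcut : (decide (¬ gaps.getD (i + L) 0 = gaps.getD (i + L - 1) 0)) = true := by
      have hne : ¬ gaps.getD (i + L) 0 = gaps[i] :=
        pvCountRun_stop gaps i gaps[i] 1 L hLdef.symm hlt
      have heqp : gaps.getD (i + L - 1) 0 = gaps[i] := by
        have := hrun0 (L - 1) (by omega)
        rwa [show i + (L - 1) = i + L - 1 by omega] at this
      simp only [decide_eq_true_eq]
      exact fun hc => hne (hc.trans heqp)
    have hrange : List.range' (i + L) (gaps.length - i - L) =
        (i + L) :: List.range' (i + L + 1) (gaps.length - (i + L) - 1) := by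
      rw [show gaps.length - i - L = (gaps.length - (i + L) - 1) + 1 by omega]
      rw [List.range'_succ]
    rw [hrange, List.filter_cons, hcut]
    show pvProc gaps ml i ((i + L) :: _) = _
    rw [pvProc]
    simp only [List.append_eq]
    rw [pvProc_eq_ALoop gaps ml (i + L) hlt]
    rw [hcast]
    congr 2
    rw [List.getD_eq_getElem _ _ h]
  · -- the first run reaches the end of the list
    have hiL : i + L = gaps.length := by omega
    have hr0 : List.range' (i + L) (gaps.length - i - L) = [] := by
      rw [show gaps.length - i - L = 0 by omega]
      rfl
    rw [hr0, List.filter_nil]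
    show pvProc gaps ml i [gaps.length] = _
    rw [pvProc, pvProc]
    rw [← hiL, hcast]
    have hend : pvALoop gaps ml (i + L) = [] := by
      rw [pvALoop, dif_neg (by omega)]
    rw [hend]
    congr 2
    rw [List.getD_eq_getElem _ _ h]
termination_by gaps.length - i
decreasing_by omega

-- ===== VERDICT (by name: the statement is the Claim_ definition above) =====
theorem find_consecutive_equal_gaps_spec : Claim_equal_find_consecutive_equal_gaps := by
  intro gaps ml _
  unfold Spec_find_consecutive_equal_gaps find_consecutive_equal_gaps find_consecutive_equal_gaps_alt
  split
  · rfl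
  · rename_i hge
    have h0 : 0 < gaps.length := by omega
    rw [show (pvBounds gaps).tail = pvCuts gaps ++ [gaps.length] from rfl]
    rw [show pvBounds gaps = 0 :: (pvCuts gaps ++ [gaps.length]) from rfl]
    rw [pvZip_eq_proc]
    simpa [pvCuts] using (pvProc_eq_ALoop gaps ml 0 h0).symm
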